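-- pv_equiv track=rewrite | github.com/StijnSlot/AdventOfCode | python/adventofcode/days/10.py | find_corrupted
-- ===== SOURCE A (Python) =====
-- from typing import Optional
--
-- bracket_map = {'(': ')', '[': ']', '{': '}', '<': '>'}
--
-- def find_corrupted(line: str, i: int, open_brackets: list[str]) -> Optional[str]:
--     if i >= len(line):
--         return None
--     if line[i] in bracket_map:
--         open_brackets.append(line[i])
--         return find_corrupted(line, i+1, open_brackets)
--     last = open_brackets.pop() if len(open_brackets) > 0 else None
--     if line[i] == bracket_map[last]:
--         return find_corrupted(line, i + 1, open_brackets)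
--     return line[i]
-- ===== SOURCE B (Python) =====
-- from typing import Optional
--
-- bracket_map = {'(': ')', '[': ']', '{': '}', '<': '>'}
--
-- def find_corrupted(line: str, i: int, open_brackets: list[str]) -> Optional[str]:
--     # iterative loop over the index range instead of A's recursion;
--     # mutates open_brackets in place exactly as A does
--     for j in range(i, len(line)):
--         char = line[j]
--         if char in bracket_map:
--             open_brackets.append(char)
--             continue
--         last = open_brackets.pop() if open_brackets else None
--         if char != bracket_map[last]:
--             return char
--     return None
-- ===== Notes on version B (the rewrite author's own statement) =====
-- stated objective: idiomatic
-- what changed: Replaces A's tail recursion (one Python call frame per character) with a single iterative for-loop over range(i, len(line)); same stack discipline, same in-place mutation of open_brackets, identical values and exceptions everywhere.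
import Mathlib
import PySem

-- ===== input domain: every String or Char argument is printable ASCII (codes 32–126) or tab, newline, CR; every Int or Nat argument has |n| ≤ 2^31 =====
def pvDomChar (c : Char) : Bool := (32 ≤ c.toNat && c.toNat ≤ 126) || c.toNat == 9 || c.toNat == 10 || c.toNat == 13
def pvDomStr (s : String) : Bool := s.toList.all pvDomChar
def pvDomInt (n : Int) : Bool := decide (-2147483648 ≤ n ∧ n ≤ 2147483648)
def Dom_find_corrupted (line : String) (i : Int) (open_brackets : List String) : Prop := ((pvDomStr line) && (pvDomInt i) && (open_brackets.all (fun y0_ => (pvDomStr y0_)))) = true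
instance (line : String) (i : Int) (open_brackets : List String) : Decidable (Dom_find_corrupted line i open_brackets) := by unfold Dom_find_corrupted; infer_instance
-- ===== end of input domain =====

-- B replaces A's per-character tail recursion by one iterative loop over range(i, len(line));
-- same return value and same in-place mutation of open_brackets (objective: idiomatic).

-- ===== PORT A =====
def pvBracketMap : PySem.Dict String String :=
  PySem.Dict.ofList [("(", ")"), ("[", "]"), ("{", "}"), ("<", ">")]

-- literal port of A's recursion; where the Python raises (IndexError for i < -len,
-- KeyError on a pop from an empty stack or a popped element that is not a key) the
-- port returns none — exactly those inputs are excluded by Pre_find_corrupted.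
def find_corrupted (line : String) (i : Int) (open_brackets : List String) : Option String :=
  if PySem.Str.len line ≤ i then none
  else
    match PySem.Str.pyGet? line i with
    | none => none  -- IndexError: excluded by Pre_
    | some c =>
      let ch := String.ofList [c]
      if pvBracketMap.contains ch then
        find_corrupted line (i + 1) (open_brackets ++ [ch])
      else
        match (if open_brackets.length > 0 then open_brackets.getLast? else none) with
        | none => none  -- bracket_map[None]: KeyError, excluded by Pre_
        | some last =>
          match pvBracketMap.get? last with
          | none => none  -- KeyError: excluded by Pre_
          | some m =>
            if ch = m then find_corrupted line (i + 1) open_brackets.dropLast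
            else some ch
termination_by (PySem.Str.len line - i).toNat
decreasing_by
  all_goals simp only [PySem.Str.len_eq] at *; omega

-- ===== PORT B =====
-- the body of B's for-loop over the index list range(i, len(line)), carrying the stack
def fcScan (line : String) (js : List Int) (stack : List String) : Option String :=
  match js with
  | [] => none
  | j :: rest =>
    match PySem.Str.pyGet? line j with
    | none => none  -- IndexError, excluded by Pre_
    | some c =>
      let ch := String.ofList [c]
      if pvBracketMap.contains ch then fcScan line rest (stack ++ [ch])
      else
        match (if stack.length > 0 then stack.getLast? else none) with
        | none => none  -- KeyError, excluded by Pre_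
        | some last =>
          match pvBracketMap.get? last with
          | none => none  -- KeyError, excluded by Pre_
          | some m =>
            if ch ≠ m then some ch
            else fcScan line rest stack.dropLast

def find_corrupted_alt (line : String) (i : Int) (open_brackets : List String) : Option String :=
  fcScan line (PySem.List.pyRange i (PySem.Str.len line) 1) open_brackets

-- ===== PRECONDITION & SPEC =====
def pvIsOpen (c : Char) : Bool := c = '(' || c = '[' || c = '{' || c = '<'

-- the characters the recursion visits, in order (negative -len ≤ i < 0 wraps Python-style
-- through the tail of the string and then, since each step does i+1, the whole string)
def pvSeq (line : String) (i : Int) : List Char :=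
  if 0 ≤ i then line.toList.drop i.toNat
  else line.toList.drop ((line.toList.length : Int) + i).toNat ++ line.toList

-- the closing bracket for an opening-bracket string, none for any other string
def pvClose (s : String) : Option String :=
  if s = "(" then some ")" else if s = "[" then some "]"
  else if s = "{" then some "}" else if s = "<" then some ">" else none

-- Does A raise on the visited characters, given the stack (top first)?  true exactly when,
-- with every earlier closer matching perfectly, a pop reaches an empty stack or a popped
-- element that is not an opening bracket (KeyError); a mismatch makes A return instead.
def pvRaises : List Char → List String → Bool
  | [], _ => false
  | c :: rest, st =>
    if pvIsOpen c then pvRaises rest (String.ofList [c] :: st)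
    else
      match st with
      | [] => true
      | t :: st' =>
        match pvClose t with
        | none => true
        | some m => if String.ofList [c] = m then pvRaises rest st' else false

-- Pre_ excludes EXACTLY the inputs on which the Python A raises: i < -len(line) with
-- i < len(line) (IndexError), or a KeyError as characterised by pvRaises; every input on
-- which A returns a value satisfies Pre_.
def Pre_find_corrupted (line : String) (i : Int) (open_brackets : List String) : Prop :=
  PySem.Str.len line ≤ i ∨
  (-(PySem.Str.len line) ≤ i ∧ pvRaises (pvSeq line i) open_brackets.reverse = false)

instance (line : String) (i : Int) (open_brackets : List String) : Decidable (Pre_find_corrupted line i open_brackets) := by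
  unfold Pre_find_corrupted; infer_instance

def pvWitness_find_corrupted : String × Int × List String := ("([)", 0, [])

def Spec_find_corrupted (line : String) (i : Int) (open_brackets : List String) (out : Option String) : Prop := out = find_corrupted_alt line i open_brackets
instance (line : String) (i : Int) (open_brackets : List String) (out : Option String) : Decidable (Spec_find_corrupted line i open_brackets out) := by unfold Spec_find_corrupted; infer_instance

-- ===== CLAIM (what is proved, stated in full; the proofs are below) =====
def Claim_equal_find_corrupted : Prop := ∀ (line : String) (i : Int) (open_brackets : List String), Dom_find_corrupted line i open_brackets → Pre_find_corrupted line i open_brackets → Spec_find_corrupted line i open_brackets (find_corrupted line i open_brackets)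

-- ===== LEMMAS AND PROOFS =====
lemma fc_eq_scan (line : String) : ∀ (n : Nat) (i : Int) (ob : List String),
    (PySem.Str.len line - i).toNat ≤ n →
    find_corrupted line i ob = fcScan line (PySem.List.pyRange i (PySem.Str.len line) 1) ob := by
  intro n
  induction n with
  | zero =>
    intro i ob h
    have hle : PySem.Str.len line ≤ i := by
      simp only [PySem.Str.len_eq] at *; omega
    rw [find_corrupted, if_pos hle, PySem.List.pyRange_one_eq_nil hle]
    rfl
  | succ n ih =>
    intro i ob h
    by_cases hle : PySem.Str.len line ≤ i
    · rw [find_corrupted, if_pos hle, PySem.List.pyRange_one_eq_nil hle]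
      rfl
    · have hlt : i < PySem.Str.len line := lt_of_not_ge hle
      have hstep : (PySem.Str.len line - (i + 1)).toNat ≤ n := by
        simp only [PySem.Str.len_eq] at *; omega
      rw [find_corrupted, if_neg hle, PySem.List.pyRange_one_cons hlt]
      show _ = (match PySem.Str.pyGet? line i with
        | none => none
        | some c =>
          let ch := String.ofList [c]
          if pvBracketMap.contains ch then fcScan line (PySem.List.pyRange (i+1) (PySem.Str.len line) 1) (ob ++ [ch])
          else
            match (if ob.length > 0 then ob.getLast? else none) with
            | none => none
            | some last =>
              match pvBracketMap.get? last with
              | none => none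
              | some m =>
                if ch ≠ m then some ch
                else fcScan line (PySem.List.pyRange (i+1) (PySem.Str.len line) 1) ob.dropLast)
      cases hg : PySem.Str.pyGet? line i with
      | none => rfl
      | some c =>
        simp only
        by_cases hc : pvBracketMap.contains (String.ofList [c]) = true
        · simp only [if_pos hc]
          exact ih (i + 1) (ob ++ [String.ofList [c]]) hstep
        · simp only [if_neg hc]
          cases hlast : (if ob.length > 0 then ob.getLast? else none) with
          | none => rfl
          | some last =>
            simp only
            cases hm : pvBracketMap.get? last with
            | none => rfl
            | some m =>
              simp only [ne_eq]
              by_cases heq : String.ofList [c] = m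
              · simp only [heq, not_true_eq_false, if_false]
                exact ih (i + 1) ob.dropLast hstep
              · simp only [if_neg heq, if_pos heq]

-- ===== VERDICT (by name: the statement is the Claim_ definition above) =====
theorem find_corrupted_spec : Claim_equal_find_corrupted := by
  intro line i ob _ _
  unfold Spec_find_corrupted find_corrupted_alt
  exact fc_eq_scan line (PySem.Str.len line - i).toNat i ob le_rfl
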